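-- pv_equiv track=rewrite | github.com/mit4351/Reversi | wx/ReverseCommon.py | has_right_reversible_stone
-- ===== SOURCE A (Python) =====
-- NONE = None # 何も置かれていない
--
-- def has_right_reversible_stone(stone_status, i, j, color):
--     enemy = not(bool(color))
--     if j <= 5 and stone_status[i][j+1] == enemy:
--         for k in range(j + 2, 8):
--             if stone_status[i][k] == color:
--                 return True
--             elif stone_status[i][k] == NONE:
--                 break
--     return False
-- ===== SOURCE B (Python) =====
-- def has_right_reversible_stone(stone_status, i, j, color):
--     if j > 5:
--         return False
--     enemy = not bool(color)
--     row = stone_status[i]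
--     return any(
--         row[k] == color and all(row[m] == enemy for m in range(j + 1, k))
--         for k in range(j + 2, 8)
--     )
-- ===== Notes on version B (the rewrite author's own statement) =====
-- stated objective: alternative
-- what changed: B replaces A's single left-to-right scan with early return/break by a declarative candidate-verification search: for every candidate closing cell k it independently re-checks that the whole gap (j+1..k-1) is a nonempty run of enemy stones, trading A's stateful scan for an any/all existential formulation.
-- outside the precondition, e.g. on has_right_reversible_stone([[None, None]], 0, 0, True): A returns False, B raises IndexError
import Mathlib
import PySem

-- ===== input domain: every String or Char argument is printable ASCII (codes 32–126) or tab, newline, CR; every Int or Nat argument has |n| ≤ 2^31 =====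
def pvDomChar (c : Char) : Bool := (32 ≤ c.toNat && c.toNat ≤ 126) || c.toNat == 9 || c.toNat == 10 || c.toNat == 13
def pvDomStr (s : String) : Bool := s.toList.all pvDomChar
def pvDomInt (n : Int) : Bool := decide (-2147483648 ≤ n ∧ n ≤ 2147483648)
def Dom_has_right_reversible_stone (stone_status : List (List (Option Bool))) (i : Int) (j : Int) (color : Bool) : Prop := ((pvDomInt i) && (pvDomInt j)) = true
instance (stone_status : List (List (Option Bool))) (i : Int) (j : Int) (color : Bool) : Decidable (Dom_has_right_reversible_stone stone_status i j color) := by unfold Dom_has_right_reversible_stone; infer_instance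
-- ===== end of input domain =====

-- B replaces A's stateful scan with early return/break by a candidate-verification search:
-- for every candidate closing cell it re-checks the whole gap independently (any/all form).

-- ===== PORT A =====
-- A's for-loop over range(j+2, 8) with return/break, as structural recursion over the range list.
def hrrsA_go (row : List (Option Bool)) (color : Bool) : List Int → Bool
  | [] => false
  | k :: ks =>
    if (PySem.List.pyGet? row k).getD none == some color then true
    else if (PySem.List.pyGet? row k).getD none == (none : Option Bool) then false
    else hrrsA_go row color ks

def has_right_reversible_stone (stone_status : List (List (Option Bool))) (i : Int) (j : Int) (color : Bool) : Bool :=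
  let enemy := !color
  if j ≤ 5 &&
      ((PySem.List.pyGet? ((PySem.List.pyGet? stone_status i).getD []) (j+1)).getD none == some enemy) then
    hrrsA_go ((PySem.List.pyGet? stone_status i).getD []) color (PySem.List.pyRange (j+2) 8 1)
  else
    false

-- ===== PORT B =====
-- B's 'any(row[k] == color and all(row[m] == enemy for m in range(j+1, k)) for k in range(j+2, 8))'.
def has_right_reversible_stone_alt (stone_status : List (List (Option Bool))) (i : Int) (j : Int) (color : Bool) : Bool :=
  if 5 < j then false
  else
    let enemy := !color
    let row := (PySem.List.pyGet? stone_status i).getD []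
    (PySem.List.pyRange (j+2) 8 1).any (fun k =>
      ((PySem.List.pyGet? row k).getD none == some color) &&
      (PySem.List.pyRange (j+1) k 1).all (fun m => (PySem.List.pyGet? row m).getD none == some enemy))

-- ===== PRECONDITION & SPEC =====
-- Pre_ restricts to the natural domain: either j ≥ 6 (neither program touches a cell) or
-- in-range non-negative indices into a row of width ≥ 8; outside it A raises IndexError, or its
-- value rests on Python's accidental negative-index wraparound, or B raises where A returns.
def Pre_has_right_reversible_stone (stone_status : List (List (Option Bool))) (i : Int) (j : Int) (color : Bool) : Prop :=
  6 ≤ j ∨ (0 ≤ i ∧ i < stone_status.length ∧ 0 ≤ j ∧ 8 ≤ (stone_status.getD i.toNat []).length)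
instance (stone_status : List (List (Option Bool))) (i : Int) (j : Int) (color : Bool) : Decidable (Pre_has_right_reversible_stone stone_status i j color) := by unfold Pre_has_right_reversible_stone; infer_instance

def pvWitness_has_right_reversible_stone : List (List (Option Bool)) × Int × Int × Bool :=
  ([[none, some false, some true, none, none, none, none, none]], 0, 0, true)

def Spec_has_right_reversible_stone (stone_status : List (List (Option Bool))) (i : Int) (j : Int) (color : Bool) (out : Bool) : Prop := out = has_right_reversible_stone_alt stone_status i j color
instance (stone_status : List (List (Option Bool))) (i : Int) (j : Int) (color : Bool) (out : Bool) : Decidable (Spec_has_right_reversible_stone stone_status i j color out) := by unfold Spec_has_right_reversible_stone; infer_instance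

-- ===== CLAIM =====
def Claim_equal_has_right_reversible_stone : Prop := ∀ (stone_status : List (List (Option Bool))) (i : Int) (j : Int) (color : Bool), Dom_has_right_reversible_stone stone_status i j color → Pre_has_right_reversible_stone stone_status i j color → Spec_has_right_reversible_stone stone_status i j color (has_right_reversible_stone stone_status i j color)

-- ===== LEMMAS AND PROOFS =====

-- the candidate-k predicate of B
def hrrsPred (row : List (Option Bool)) (color : Bool) (j : Int) (k : Int) : Bool :=
  ((PySem.List.pyGet? row k).getD none == some color) &&
  (PySem.List.pyRange (j+1) k 1).all (fun m => (PySem.List.pyGet? row m).getD none == some (!color))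

theorem hrrs_main (row : List (Option Bool)) (color : Bool) (j : Int) :
    ∀ (n : Nat) (k : Int), k + n = 8 → j + 1 < k →
      (∀ m, j + 1 ≤ m → m < k → (PySem.List.pyGet? row m).getD none = some (!color)) →
      hrrsA_go row color (PySem.List.pyRange k 8 1) =
        (PySem.List.pyRange k 8 1).any (hrrsPred row color j) := by
  intro n
  induction n with
  | zero =>
    intro k hk _ _
    have : (8:Int) ≤ k := by omega
    rw [PySem.List.pyRange_one_eq_nil this]
    simp [hrrsA_go]
  | succ m ih =>
    intro k hk hjk H
    have hklt : k < 8 := by push_cast at hk; omega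
    rw [PySem.List.pyRange_one_cons hklt]
    simp only [hrrsA_go, List.any_cons]
    by_cases hc : (PySem.List.pyGet? row k).getD none = some color
    · -- A returns True; B's head candidate succeeds
      have hall : (PySem.List.pyRange (j+1) k 1).all
          (fun m => (PySem.List.pyGet? row m).getD none == some (!color)) = true := by
        rw [List.all_eq_true]
        intro x hx
        rw [PySem.List.mem_pyRange_one] at hx
        simp [H x hx.1 hx.2]
      simp [hrrsPred, hc, hall]
    · by_cases hn : (PySem.List.pyGet? row k).getD none = none
      · -- A breaks; every candidate's gap check contains the empty cell k
        have hhead : hrrsPred row color j k = false := by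
          simp [hrrsPred, hn]
        have htail : (PySem.List.pyRange (k+1) 8 1).any (hrrsPred row color j) = false := by
          rw [List.any_eq_false]
          intro t ht
          rw [PySem.List.mem_pyRange_one] at ht
          simp only [hrrsPred, Bool.and_eq_true, not_and, List.all_eq_true]
          intro _ hall
          have hkmem := hall k (by rw [PySem.List.mem_pyRange_one]; omega)
          rw [hn] at hkmem
          simp at hkmem
        rw [hhead, htail]
        simp [hn]
      · -- cell k is an enemy stone: A continues; B's head candidate fails on the color test
        have hcell : (PySem.List.pyGet? row k).getD none = some (!color) := by
          cases hval : (PySem.List.pyGet? row k).getD none with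
          | none => exact absurd hval hn
          | some b => rw [hval] at hc; cases b <;> cases color <;> simp_all
        have hhead : hrrsPred row color j k = false := by
          simp [hrrsPred, hcell]
        rw [hhead]
        have hA : ((PySem.List.pyGet? row k).getD none == some color) = false := by
          rw [hcell]; cases color <;> simp
        have hN : ((PySem.List.pyGet? row k).getD none == (none : Option Bool)) = false := by
          rw [hcell]; simp
        simp only [hA, hN, Bool.false_eq_true, if_false, Bool.false_or]
        exact ih (k+1) (by push_cast at hk ⊢; omega) (by omega)
          (by intro x h1 h2
              rcases eq_or_lt_of_le (show x ≤ k by omega) with h | h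
              · exact h ▸ hcell
              · exact H x h1 (by omega))

theorem has_right_reversible_stone_eq (stone_status : List (List (Option Bool))) (i : Int) (j : Int) (color : Bool)
    (hpre : Pre_has_right_reversible_stone stone_status i j color) :
    has_right_reversible_stone stone_status i j color = has_right_reversible_stone_alt stone_status i j color := by
  by_cases hj6 : 6 ≤ j
  · simp [has_right_reversible_stone, has_right_reversible_stone_alt, show (5:Int) < j by omega,
      show ¬ (j ≤ 5) by omega]
  · rcases hpre with h | ⟨_, _, hj0, _⟩
    · omega
    have hj5 : j ≤ 5 := by omega
    simp only [has_right_reversible_stone, has_right_reversible_stone_alt]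
    rw [if_neg (show ¬ (5 < j) by omega)]
    by_cases hg : (PySem.List.pyGet? ((PySem.List.pyGet? stone_status i).getD []) (j+1)).getD none = some (!color)
    · rw [if_pos (by simp [hj5, hg])]
      rw [hrrs_main ((PySem.List.pyGet? stone_status i).getD []) color j (8 - (j+2)).toNat (j+2)
        (by omega) (by omega)
        (by intro m h1 h2
            have : m = j + 1 := by omega
            exact this ▸ hg)]
      rfl
    · -- guard false: A returns False; every candidate's gap check fails at cell j+1
      rw [if_neg (by simp [hg])]
      symm
      rw [List.any_eq_false]
      intro t ht
      rw [PySem.List.mem_pyRange_one] at ht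
      simp only [Bool.and_eq_true, not_and, List.all_eq_true]
      intro _ hall
      have := hall (j+1) (by rw [PySem.List.mem_pyRange_one]; omega)
      simp only [beq_iff_eq] at this
      exact hg this

-- ===== VERDICT =====
theorem has_right_reversible_stone_spec : Claim_equal_has_right_reversible_stone := by
  intro stone_status i j color _ hpre
  unfold Spec_has_right_reversible_stone
  exact has_right_reversible_stone_eq stone_status i j color hpre
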